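-- pv_equiv track=rewrite | github.com/venkynarra/my-agents | foundations/prompt_optimizer.py | _prioritize_categories
-- ===== SOURCE A (Python) =====
-- from typing import Dict, List, Optional, Any, Tuple
--
-- def _prioritize_categories(categories: List[str]) -> List[str]:
--     """Prioritize context categories by importance."""
--     priority_order = [
--         "technical_skills",
--         "experience",
--         "projects",
--         "education"
--     ]
--
--     # Sort categories by priority
--     prioritized = []
--     for priority_cat in priority_order:
--         if priority_cat in categories:
--             prioritized.append(priority_cat)
--
--     # Add any remaining categories
--     for cat in categories:
--         if cat not in prioritized:
--             prioritized.append(cat)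
--
--     return prioritized
-- ===== SOURCE B (Python) =====
-- def _prioritize_categories(categories):
--     """Prioritize context categories by importance."""
--     priority_order = [
--         "technical_skills",
--         "experience",
--         "projects",
--         "education"
--     ]
--     deduped = list(dict.fromkeys(categories))
--     return sorted(deduped,
--                   key=lambda c: priority_order.index(c) if c in priority_order
--                   else len(priority_order))
-- ===== Notes on version B (the rewrite author's own statement) =====
-- stated objective: faster
-- what changed: A builds the result by two membership-filtering passes (priority list filtered against the input, then the input re-scanned against the growing result list to dedup the remainder); B deduplicates the input once (dict.fromkeys) and does one stable sort keyed by position in the fixed priority list (non-priority items share a sentinel key, so stability preserves their first-occurrence order).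
import Mathlib
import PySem

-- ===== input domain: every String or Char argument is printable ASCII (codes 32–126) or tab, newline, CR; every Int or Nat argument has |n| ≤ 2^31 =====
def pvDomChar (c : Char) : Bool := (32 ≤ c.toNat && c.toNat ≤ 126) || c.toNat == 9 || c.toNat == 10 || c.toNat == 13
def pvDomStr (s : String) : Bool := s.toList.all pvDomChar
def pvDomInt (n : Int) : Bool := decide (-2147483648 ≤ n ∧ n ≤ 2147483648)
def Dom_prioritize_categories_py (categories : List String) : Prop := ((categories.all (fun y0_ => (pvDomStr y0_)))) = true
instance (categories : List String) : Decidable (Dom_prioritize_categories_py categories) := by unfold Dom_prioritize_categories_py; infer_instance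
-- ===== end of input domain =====

-- B replaces A's two membership-filtering passes by an ordered dedup followed by one
-- stable sort keyed by position in the fixed priority list (objective: faster, measured).


-- ===== PORT A =====
def prioritize_categories_py (categories : List String) : List String :=
  let priority_order : List String := ["technical_skills", "experience", "projects", "education"]
  -- for priority_cat in priority_order: if priority_cat in categories: prioritized.append(priority_cat)
  let prioritized : List String :=
    priority_order.foldl (fun acc p => if categories.contains p then acc ++ [p] else acc) []
  -- for cat in categories: if cat not in prioritized: prioritized.append(cat)
  categories.foldl (fun acc c => if acc.contains c then acc else acc ++ [c]) prioritized

-- ===== PORT B =====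
def prioritize_categories_py_alt (categories : List String) : List String :=
  let priority_order : List String := ["technical_skills", "experience", "projects", "education"]
  -- deduped = list(dict.fromkeys(categories))
  let deduped : List String := PySem.List.dedup categories
  -- sorted(deduped, key=lambda c: priority_order.index(c) if c in priority_order else len(priority_order))
  PySem.List.sorted deduped
    (fun c => if priority_order.contains c
              then (((PySem.List.index? priority_order c).getD 0 : Nat) : Int)
              else (priority_order.length : Int))
    false

-- ===== PRECONDITION & SPEC =====
def Spec_prioritize_categories_py (categories : List String) (out : List String) : Prop := out = prioritize_categories_py_alt categories
instance (categories : List String) (out : List String) : Decidable (Spec_prioritize_categories_py categories out) := by unfold Spec_prioritize_categories_py; infer_instance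

-- ===== CLAIM (what is proved, stated in full; the proofs are below) =====
def Claim_equal_prioritize_categories_py : Prop := ∀ (categories : List String), Dom_prioritize_categories_py categories → Spec_prioritize_categories_py categories (prioritize_categories_py categories)

-- ===== LEMMAS AND PROOFS =====

-- the fixed priority list both ports call `priority_order`
def pvP : List String := ["technical_skills", "experience", "projects", "education"]

-- B's sort key, named for the proofs
def pvKey (c : String) : Int :=
  if pvP.contains c then (((PySem.List.index? pvP c).getD 0 : Nat) : Int) else (pvP.length : Int)

-- pvKey evaluated: position in pvP, else 4
theorem pvKey_eq (c : String) :
    pvKey c = if c = "technical_skills" then 0 else if c = "experience" then 1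
              else if c = "projects" then 2 else if c = "education" then 3 else 4 := by
  by_cases h1 : c = "technical_skills"
  · subst h1; decide
  by_cases h2 : c = "experience"
  · subst h2; decide
  by_cases h3 : c = "projects"
  · subst h3; decide
  by_cases h4 : c = "education"
  · subst h4; decide
  simp [pvKey, pvP, h1, h2, h3, h4]

-- the bucket of key value i
def pvF (i : Int) (xs : List String) : List String := xs.filter (fun c => pvKey c == i)

-- insertBy skips a prefix none of whose elements x goes before
theorem pvInsert_skip (before : String → String → Bool) (x : String) (L R : List String)
    (h : ∀ y ∈ L, before x y = false) :
    PySem.List.insertBy before x (L ++ R) = L ++ PySem.List.insertBy before x R := by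
  induction L with
  | nil => simp
  | cons a L ih =>
    have ha : before x a = false := h a (List.mem_cons_self ..)
    simp only [List.cons_append, PySem.List.insertBy, ha]
    simp only [Bool.false_eq_true, if_false]
    exact congrArg (a :: ·) (ih fun y hy => h y (List.mem_cons_of_mem _ hy))

-- insertBy lands at the front when x goes before everything
theorem pvInsert_front (before : String → String → Bool) (x : String) (R : List String)
    (h : ∀ y ∈ R, before x y = true) :
    PySem.List.insertBy before x R = x :: R := by
  cases R with
  | nil => rfl
  | cons a R => simp [PySem.List.insertBy, h a (List.mem_cons_self ..)]

-- stable-sort bucket decomposition for the 5-valued key pvKey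
theorem pvSortedBuckets (xs : List String) :
    PySem.List.sorted xs pvKey false
      = pvF 0 xs ++ (pvF 1 xs ++ (pvF 2 xs ++ (pvF 3 xs ++ pvF 4 xs))) := by
  induction xs using List.reverseRecOn with
  | nil => rfl
  | append_singleton ys c ih =>
    rw [PySem.List.sorted_eq_foldl_insertBy, List.foldl_append,
        ← PySem.List.sorted_eq_foldl_insertBy, ih]
    simp only [List.foldl_cons, List.foldl_nil]
    set before : String → String → Bool := fun a b => decide (pvKey a < pvKey b) with hb
    have hv : pvKey c = 0 ∨ pvKey c = 1 ∨ pvKey c = 2 ∨ pvKey c = 3 ∨ pvKey c = 4 := by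
      rw [pvKey_eq]; split_ifs <;> simp
    have hFapp : ∀ i : Int, pvF i (ys ++ [c]) = pvF i ys ++ if pvKey c = i then [c] else [] := by
      intro i; unfold pvF; rw [List.filter_append]
      by_cases h : pvKey c = i
      · simp [List.filter, h]
      · simp [List.filter, beq_eq_false_iff_ne.mpr h, h]
    have hmemF : ∀ (i : Int) (y : String), y ∈ pvF i ys → pvKey y = i := by
      intro i y hy
      have := List.of_mem_filter hy
      simpa using this
    have hlt : ∀ (i : Int) (y : String), y ∈ pvF i ys → before c y = decide (pvKey c < i) := by
      intro i y hy; rw [hb]; simp only [hmemF _ _ hy]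
    rcases hv with h | h | h | h | h
    · -- pvKey c = 0
      simp only [hFapp, h]
      norm_num
      rw [pvInsert_skip before c (pvF 0 ys) _ (fun y hy => by rw [hlt 0 y hy, h]; decide)]
      rw [pvInsert_front before c _ (by
        intro y hy
        simp only [List.mem_append] at hy
        rcases hy with hy | hy | hy | hy <;>
          first
            | (rw [hlt 1 y hy, h]; decide)
            | (rw [hlt 2 y hy, h]; decide)
            | (rw [hlt 3 y hy, h]; decide)
            | (rw [hlt 4 y hy, h]; decide))]
    · -- pvKey c = 1
      simp only [hFapp, h]
      norm_num
      rw [pvInsert_skip before c (pvF 0 ys) _ (fun y hy => by rw [hlt 0 y hy, h]; decide)]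
      rw [pvInsert_skip before c (pvF 1 ys) _ (fun y hy => by rw [hlt 1 y hy, h]; decide)]
      rw [pvInsert_front before c _ (by
        intro y hy
        simp only [List.mem_append] at hy
        rcases hy with hy | hy | hy <;>
          first
            | (rw [hlt 2 y hy, h]; decide)
            | (rw [hlt 3 y hy, h]; decide)
            | (rw [hlt 4 y hy, h]; decide))]
    · -- pvKey c = 2
      simp only [hFapp, h]
      norm_num
      rw [pvInsert_skip before c (pvF 0 ys) _ (fun y hy => by rw [hlt 0 y hy, h]; decide)]
      rw [pvInsert_skip before c (pvF 1 ys) _ (fun y hy => by rw [hlt 1 y hy, h]; decide)]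
      rw [pvInsert_skip before c (pvF 2 ys) _ (fun y hy => by rw [hlt 2 y hy, h]; decide)]
      rw [pvInsert_front before c _ (by
        intro y hy
        simp only [List.mem_append] at hy
        rcases hy with hy | hy <;>
          first
            | (rw [hlt 3 y hy, h]; decide)
            | (rw [hlt 4 y hy, h]; decide))]
    · -- pvKey c = 3
      simp only [hFapp, h]
      norm_num
      rw [pvInsert_skip before c (pvF 0 ys) _ (fun y hy => by rw [hlt 0 y hy, h]; decide)]
      rw [pvInsert_skip before c (pvF 1 ys) _ (fun y hy => by rw [hlt 1 y hy, h]; decide)]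
      rw [pvInsert_skip before c (pvF 2 ys) _ (fun y hy => by rw [hlt 2 y hy, h]; decide)]
      rw [pvInsert_skip before c (pvF 3 ys) _ (fun y hy => by rw [hlt 3 y hy, h]; decide)]
      rw [pvInsert_front before c _ (fun y hy => by rw [hlt 4 y hy, h]; decide)]
    · -- pvKey c = 4
      simp only [hFapp, h]
      norm_num
      rw [pvInsert_skip before c (pvF 0 ys) _ (fun y hy => by rw [hlt 0 y hy, h]; decide)]
      rw [pvInsert_skip before c (pvF 1 ys) _ (fun y hy => by rw [hlt 1 y hy, h]; decide)]
      rw [pvInsert_skip before c (pvF 2 ys) _ (fun y hy => by rw [hlt 2 y hy, h]; decide)]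
      rw [pvInsert_skip before c (pvF 3 ys) _ (fun y hy => by rw [hlt 3 y hy, h]; decide)]
      rw [PySem.List.insertBy_of_forall_not_before before c _
            (fun y hy => by rw [hlt 4 y hy, h]; decide)]

-- A's second loop, generalized: a1 answers membership like pvP on the remaining input,
-- and the tail so far is the non-priority filter of the seen-set s
theorem pvA2 (cs : List String) : ∀ (a1 s : List String),
    (∀ x ∈ cs, a1.contains x = pvP.contains x) →
    cs.foldl (fun acc c => if acc.contains c then acc else acc ++ [c])
      (a1 ++ s.filter (fun c => !pvP.contains c))
      = a1 ++ (cs.foldl PySem.Set.add s).filter (fun c => !pvP.contains c) := by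
  induction cs with
  | nil => intro a1 s _; simp
  | cons c cs ih =>
    intro a1 s ha
    have hac : a1.contains c = pvP.contains c := ha c (List.mem_cons_self ..)
    have ha' : ∀ x ∈ cs, a1.contains x = pvP.contains x :=
      fun x hx => ha x (List.mem_cons_of_mem _ hx)
    simp only [List.foldl_cons]
    have hfc : (s.filter (fun x => !pvP.contains x)).contains c
        = (s.contains c && !pvP.contains c) := by
      apply Bool.eq_iff_iff.mpr
      simp only [List.contains_iff_mem, List.mem_filter, Bool.and_eq_true]
    have hcont : (a1 ++ s.filter (fun x => !pvP.contains x)).contains c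
        = (pvP.contains c || (s.contains c && !pvP.contains c)) := by
      rw [List.contains_append, hac, hfc]
    by_cases hp : pvP.contains c = true
    · have h1 : (a1 ++ s.filter (fun x => !pvP.contains x)).contains c = true := by
        rw [hcont, hp]; simp
      rw [if_pos h1]
      have hadd : (PySem.Set.add s c).filter (fun x => !pvP.contains x)
          = s.filter (fun x => !pvP.contains x) := by
        by_cases hc : PySem.Set.contains s c = true
        · rw [show PySem.Set.add s c = s from by unfold PySem.Set.add; rw [if_pos hc]]
        · rw [show PySem.Set.add s c = s ++ [c] from by unfold PySem.Set.add; rw [if_neg hc],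
            List.filter_append]
          have hmem : c ∈ pvP := by simpa [List.contains_iff_mem] using hp
          simp [hmem]
      rw [← hadd]
      exact ih a1 (PySem.Set.add s c) ha'
    · have hpb : pvP.contains c = false := by simpa using hp
      by_cases hs : s.contains c = true
      · have h1 : (a1 ++ s.filter (fun x => !pvP.contains x)).contains c = true := by
          rw [hcont, hpb, hs]; simp
        rw [if_pos h1]
        have hadd : PySem.Set.add s c = s := by
          unfold PySem.Set.add
          rw [if_pos (show PySem.Set.contains s c = true from hs)]
        rw [hadd]
        exact ih a1 s ha'
      · have hsb : s.contains c = false := by simpa using hs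
        have h1 : (a1 ++ s.filter (fun x => !pvP.contains x)).contains c = false := by
          rw [hcont, hpb, hsb]; simp
        rw [if_neg (by rw [h1]; exact Bool.false_ne_true)]
        have hadd : PySem.Set.add s c = s ++ [c] := by
          unfold PySem.Set.add
          rw [if_neg (by rw [show PySem.Set.contains s c = s.contains c from rfl, hsb]; exact Bool.false_ne_true)]
        have hfilt : (s ++ [c]).filter (fun x => !pvP.contains x)
            = s.filter (fun x => !pvP.contains x) ++ [c] := by
          have hnm : c ∉ pvP := by
            intro hm; rw [List.contains_iff_mem.mpr hm] at hpb; cases hpb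
          rw [List.filter_append]; simp [hnm]
        rw [hadd, List.append_assoc, ← hfilt]
        exact ih a1 (s ++ [c]) ha'

-- a nodup list filtered by equality with a is [a] or [] according to membership
theorem pvNodupFilterEq (l : List String) (hl : l.Nodup) (a : String) :
    l.filter (fun c => c == a) = if l.contains a then [a] else [] := by
  rw [List.filter_beq]
  by_cases h : a ∈ l
  · rw [List.count_eq_one_of_mem hl h]
    simp [h]
  · rw [List.count_eq_zero_of_not_mem h]
    simp [h]

-- the four priority buckets test equality with the four priority strings
theorem pvKey_beq_zero (c : String) : (pvKey c == (0 : Int)) = (c == "technical_skills") := by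
  rw [pvKey_eq]; split_ifs <;> simp_all
theorem pvKey_beq_one (c : String) : (pvKey c == (1 : Int)) = (c == "experience") := by
  rw [pvKey_eq]; split_ifs <;> simp_all
theorem pvKey_beq_two (c : String) : (pvKey c == (2 : Int)) = (c == "projects") := by
  rw [pvKey_eq]; split_ifs <;> simp_all
theorem pvKey_beq_three (c : String) : (pvKey c == (3 : Int)) = (c == "education") := by
  rw [pvKey_eq]; split_ifs <;> simp_all
-- and the remainder bucket is exactly the non-priority elements
theorem pvKey_beq_four (c : String) : (pvKey c == (4 : Int)) = !pvP.contains c := by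
  rw [pvKey_eq]
  split_ifs <;> simp_all [pvP]

-- ===== VERDICT (by name: the statement is the Claim_ definition above) =====
theorem prioritize_categories_py_spec : Claim_equal_prioritize_categories_py := by
  intro categories _
  unfold Spec_prioritize_categories_py
  show prioritize_categories_py categories
      = PySem.List.sorted (PySem.List.dedup categories) pvKey false
  rw [pvSortedBuckets]
  set d := PySem.List.dedup categories with hd
  have hdnodup : d.Nodup := PySem.List.nodup_dedup categories
  have hdmem : ∀ a : String, d.contains a = categories.contains a := by
    intro a
    apply Bool.eq_iff_iff.mpr
    simp [hd]
  -- each priority bucket of d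
  have hb0 : pvF 0 d = if categories.contains "technical_skills" then ["technical_skills"] else [] := by
    unfold pvF
    rw [List.filter_congr (fun c _ => pvKey_beq_zero c), pvNodupFilterEq d hdnodup _, hdmem]
  have hb1 : pvF 1 d = if categories.contains "experience" then ["experience"] else [] := by
    unfold pvF
    rw [List.filter_congr (fun c _ => pvKey_beq_one c), pvNodupFilterEq d hdnodup _, hdmem]
  have hb2 : pvF 2 d = if categories.contains "projects" then ["projects"] else [] := by
    unfold pvF
    rw [List.filter_congr (fun c _ => pvKey_beq_two c), pvNodupFilterEq d hdnodup _, hdmem]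
  have hb3 : pvF 3 d = if categories.contains "education" then ["education"] else [] := by
    unfold pvF
    rw [List.filter_congr (fun c _ => pvKey_beq_three c), pvNodupFilterEq d hdnodup _, hdmem]
  have hb4 : pvF 4 d = d.filter (fun c => !pvP.contains c) := by
    unfold pvF
    exact List.filter_congr (fun c _ => pvKey_beq_four c)
  -- A's first loop builds the filter of the priority list
  have hA1 : pvP.foldl (fun acc p => if categories.contains p then acc ++ [p] else acc) []
      = pvP.filter (fun p => categories.contains p) := by
    simpa using PySem.List.foldl_append_if_eq_filter (fun p => categories.contains p) pvP []
  -- that filter answers membership like pvP itself on elements of the input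
  have ha : ∀ x ∈ categories,
      (pvP.filter (fun p => categories.contains p)).contains x = pvP.contains x := by
    intro x hx
    apply Bool.eq_iff_iff.mpr
    simp only [List.contains_iff_mem, List.mem_filter]
    exact ⟨fun h => h.1, fun h => ⟨h, by simpa [List.contains_iff_mem] using hx⟩⟩
  -- A's second loop appends the deduplicated non-priority remainder
  have hA2 := pvA2 categories (pvP.filter (fun p => categories.contains p)) [] ha
  show categories.foldl (fun acc c => if acc.contains c then acc else acc ++ [c])
        (pvP.foldl (fun acc p => if categories.contains p then acc ++ [p] else acc) [])
      = _
  rw [hA1]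
  have hinit : pvP.filter (fun p => categories.contains p)
      = pvP.filter (fun p => categories.contains p)
        ++ ([] : List String).filter (fun c => !pvP.contains c) := by simp
  rw [hinit, hA2, ← PySem.Set.ofList_eq_foldl, ← PySem.List.dedup_eq_ofList, ← hd]
  -- the priority-list filter is the concatenation of the four priority buckets
  rw [hb0, hb1, hb2, hb3, hb4]
  by_cases h1 : categories.contains "technical_skills" <;>
    by_cases h2 : categories.contains "experience" <;>
      by_cases h3 : categories.contains "projects" <;>
        by_cases h4 : categories.contains "education" <;>
          simp_all [pvP, List.filter]
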